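-- pv_equiv track=rewrite | github.com/S00ahKim/algorithm-python | get_minimum.py | calculate
-- ===== SOURCE A (Python) =====
-- def calculate(a,b,n):
--     minimum = min(a)
--     maximum = max(b)
--     a.remove(minimum)
--     b.remove(maximum)
--     n = n + minimum*maximum
--     if len(a) == 0 :
--         return n
--     else:
--         return calculate(a, b, n)
-- ===== SOURCE B (Python) =====
-- def calculate(a, b, n):
--     sa = sorted(a)
--     sb = sorted(b, reverse=True)
--     total = n
--     for x, y in zip(sa, sb):
--         total += x * y
--     return total
-- ===== Notes on version B (the rewrite author's own statement) =====
-- stated objective: faster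
-- what changed: Replaces the recursive repeated min/max scan-and-remove with a single sort of a ascending and b descending followed by one pairwise-product pass (B also does not mutate a and b, unlike A).
import Mathlib
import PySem

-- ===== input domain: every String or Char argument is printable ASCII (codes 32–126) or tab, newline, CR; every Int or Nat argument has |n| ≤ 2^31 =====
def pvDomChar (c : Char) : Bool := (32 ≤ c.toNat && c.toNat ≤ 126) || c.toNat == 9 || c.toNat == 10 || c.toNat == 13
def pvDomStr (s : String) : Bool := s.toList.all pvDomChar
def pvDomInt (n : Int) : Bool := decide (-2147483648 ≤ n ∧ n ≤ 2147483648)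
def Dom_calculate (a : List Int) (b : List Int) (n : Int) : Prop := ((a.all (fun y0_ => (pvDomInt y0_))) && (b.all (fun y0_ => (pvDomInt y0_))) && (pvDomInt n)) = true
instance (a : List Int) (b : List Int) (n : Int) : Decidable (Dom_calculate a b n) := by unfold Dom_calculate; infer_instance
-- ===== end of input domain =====

-- B replaces A's recursive repeated min/max scan-and-remove by one ascending sort of a,
-- one descending sort of b and a single pairwise-product pass (objective: faster).
-- NOTE: A mutates its arguments a and b in place (list.remove); B does not. The
-- equivalence proved here is about the RETURN value only.

-- termination helper for the port of A (cited by name in decreasing_by)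
theorem pv_remove_len {xs r : List Int} {v : Int}
    (h : PySem.List.remove? xs v = some r) : r.length < xs.length := by
  have hv : v ∈ xs := by
    by_contra hv
    rw [(PySem.List.remove?_eq_none_iff xs v).mpr hv] at h
    simp at h
  rw [PySem.List.remove?_eq_some_erase xs v hv] at h
  cases h
  exact List.length_erase_of_mem hv ▸ Nat.sub_lt (List.length_pos_of_mem hv) Nat.one_pos

-- ===== PORT A =====
def calculate (a : List Int) (b : List Int) (n : Int) : Int :=
  match PySem.List.min? a (fun x => x), PySem.List.max? b (fun x => x) with
  | some minimum, some maximum =>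
    match ha : PySem.List.remove? a minimum, PySem.List.remove? b maximum with
    | some a', some b' =>
      let n' := n + minimum * maximum
      if a'.length = 0 then n' else calculate a' b' n'
    | _, _ => n      -- unreachable: removing the found min/max always succeeds
  | _, _ => n        -- min()/max() of an empty list raises ValueError; excluded by Pre_
termination_by a.length
decreasing_by exact pv_remove_len ha

-- ===== PORT B =====
def calculate_alt (a : List Int) (b : List Int) (n : Int) : Int :=
  let sa := PySem.List.sorted a (fun x => x) false
  let sb := PySem.List.sorted b (fun x => x) true
  (sa.zip sb).foldl (fun total p => total + p.1 * p.2) n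

-- ===== PRECONDITION & SPEC =====
-- A raises ValueError (min/max of an empty list) iff a is empty or b runs out
-- before a does, i.e. unless a ≠ [] and len(a) ≤ len(b); Pre_ is exactly A's return domain.
def Pre_calculate (a : List Int) (b : List Int) (n : Int) : Prop :=
  a ≠ [] ∧ a.length ≤ b.length
instance (a : List Int) (b : List Int) (n : Int) : Decidable (Pre_calculate a b n) := by
  unfold Pre_calculate; infer_instance

def pvWitness_calculate : List Int × List Int × Int := ([1, 3, 2], [5, 4, 7], 10)

def Spec_calculate (a : List Int) (b : List Int) (n : Int) (out : Int) : Prop := out = calculate_alt a b n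
instance (a : List Int) (b : List Int) (n : Int) (out : Int) : Decidable (Spec_calculate a b n out) := by unfold Spec_calculate; infer_instance

-- ===== CLAIM (what is proved, stated in full; the proofs are below) =====
def Claim_equal_calculate : Prop := ∀ (a : List Int) (b : List Int) (n : Int), Dom_calculate a b n → Pre_calculate a b n → Spec_calculate a b n (calculate a b n)

-- ===== LEMMAS AND PROOFS =====

-- sorted(a) starts with the minimum, followed by sorted of a with one copy of it removed
theorem pv_sorted_asc_cons (a : List Int) (mn : Int) (hmem : mn ∈ a)
    (hmin : ∀ y ∈ a, mn ≤ y) :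
    PySem.List.sorted a (fun x => x) false
      = mn :: PySem.List.sorted (a.erase mn) (fun x => x) false := by
  apply PySem.List.sorted_id_eq_of_perm_of_pairwise
  · exact ((PySem.List.sorted_perm _ _ _).cons mn).trans (List.perm_cons_erase hmem).symm
  · refine List.pairwise_cons.mpr ⟨?_, ?_⟩
    · intro y hy
      exact hmin y (List.mem_of_mem_erase ((PySem.List.mem_sorted _ _ _ _).mp hy))
    · exact PySem.List.sorted_pairwise _ _

-- sorted(b, reverse=True) starts with the maximum, followed by the descending sort of the rest
theorem pv_sorted_desc_cons (b : List Int) (mx : Int) (hmem : mx ∈ b)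
    (hmax : ∀ y ∈ b, y ≤ mx) :
    PySem.List.sorted b (fun x => x) true
      = mx :: PySem.List.sorted (b.erase mx) (fun x => x) true := by
  set ys := mx :: PySem.List.sorted (b.erase mx) (fun x => x) true with hys
  have hperm : (PySem.List.sorted b (fun x => x) true).Perm ys := by
    refine (PySem.List.sorted_perm _ _ _).trans ?_
    exact ((List.perm_cons_erase hmem).trans
      (((PySem.List.sorted_perm (b.erase mx) (fun x => x) true).cons mx).symm))
  have hp1 : (PySem.List.sorted b (fun x => x) true).Pairwise (fun x y : Int => y ≤ x) :=
    PySem.List.sorted_pairwise_rev _ _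
  have hp2 : ys.Pairwise (fun x y : Int => y ≤ x) := by
    refine List.pairwise_cons.mpr ⟨?_, PySem.List.sorted_pairwise_rev _ _⟩
    intro y hy
    exact hmax y (List.mem_of_mem_erase ((PySem.List.mem_sorted _ _ _ _).mp hy))
  -- two ≥-sorted permutations of the same multiset are equal: reverse both and use ≤
  have : (PySem.List.sorted b (fun x => x) true).reverse = ys.reverse :=
    List.Perm.eq_of_pairwise' (r := fun x y : Int => x ≤ y)
      (List.pairwise_reverse.mpr hp1) (List.pairwise_reverse.mpr hp2)
      ((List.reverse_perm _).trans (hperm.trans (List.reverse_perm _).symm))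
  exact List.reverse_injective this

-- one step of B: peeling the min of a and the max of b off the sorted lists
theorem pv_alt_step (a b : List Int) (n mn mx : Int)
    (hmin : PySem.List.min? a (fun x => x) = some mn)
    (hmax : PySem.List.max? b (fun x => x) = some mx) :
    calculate_alt a b n = calculate_alt (a.erase mn) (b.erase mx) (n + mn * mx) := by
  unfold calculate_alt
  rw [pv_sorted_asc_cons a mn (PySem.List.min?_mem hmin) (PySem.List.min?_isMin hmin),
      pv_sorted_desc_cons b mx (PySem.List.max?_mem hmax) (PySem.List.max?_isMax hmax)]
  simp [List.zip_cons_cons]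

theorem pv_alt_nil (b : List Int) (n : Int) : calculate_alt [] b n = n := by
  simp [calculate_alt, PySem.List.sorted]

theorem pv_main : ∀ (k : Nat) (a b : List Int) (n : Int), a.length = k →
    a ≠ [] → a.length ≤ b.length → calculate a b n = calculate_alt a b n := by
  intro k
  induction k using Nat.strong_induction_on with
  | _ k ih =>
    intro a b n hk hne hle
    have hb : b ≠ [] := by
      intro h; subst h; simp only [List.length_nil, Nat.le_zero, List.length_eq_zero_iff] at hle
      exact hne hle
    obtain ⟨mn, hmin⟩ : ∃ mn, PySem.List.min? a (fun x => x) = some mn := by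
      cases h : PySem.List.min? a (fun x => x) with
      | none => exact absurd ((PySem.List.min?_eq_none_iff a (fun x => x)).mp h) hne
      | some mn => exact ⟨mn, rfl⟩
    obtain ⟨mx, hmax⟩ : ∃ mx, PySem.List.max? b (fun x => x) = some mx := by
      cases h : PySem.List.max? b (fun x => x) with
      | none => exact absurd ((PySem.List.max?_eq_none_iff b (fun x => x)).mp h) hb
      | some mx => exact ⟨mx, rfl⟩
    have hra : PySem.List.remove? a mn = some (a.erase mn) :=
      PySem.List.remove?_eq_some_erase a mn (PySem.List.min?_mem hmin)
    have hrb : PySem.List.remove? b mx = some (b.erase mx) :=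
      PySem.List.remove?_eq_some_erase b mx (PySem.List.max?_mem hmax)
    rw [calculate, hmin, hmax]
    rw [pv_alt_step a b n mn mx hmin hmax]
    dsimp only
    split
    · next a' b' ha' hb' =>
        rw [hra] at ha'; rw [hrb] at hb'
        cases ha'; cases hb'
        have hla : (a.erase mn).length = a.length - 1 :=
          List.length_erase_of_mem (PySem.List.min?_mem hmin)
        by_cases hz : (a.erase mn).length = 0
        · rw [if_pos hz]
          rw [List.eq_nil_of_length_eq_zero hz, pv_alt_nil]
        · rw [if_neg hz]
          refine ih (a.erase mn).length ?_ _ _ _ rfl ?_ ?_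
          · rw [← hk, hla]
            exact Nat.sub_lt (List.length_pos_of_ne_nil hne) Nat.one_pos
          · intro h; exact hz (h ▸ rfl)
          · have hlb : (b.erase mx).length = b.length - 1 :=
              List.length_erase_of_mem (PySem.List.max?_mem hmax)
            rw [hla, hlb]
            exact Nat.sub_le_sub_right hle 1
    · next h => exact (h _ _ hra hrb).elim

-- ===== VERDICT (by name: the statement is the Claim_ definition above) =====
theorem calculate_spec : Claim_equal_calculate := by
  intro a b n _ hpre
  unfold Spec_calculate
  exact pv_main a.length a b n rfl hpre.1 hpre.2
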